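-- pv_equiv track=rewrite | github.com/merlinc16/emailexplorer | dedup_network.py | _is_likely_epa
-- ===== SOURCE A (Python) =====
-- def levenshtein(s, t):
--     """Compute Levenshtein edit distance between two strings."""
--     if s == t:
--         return 0
--     if not s:
--         return len(t)
--     if not t:
--         return len(s)
--     # Use two-row approach for memory efficiency
--     prev = list(range(len(t) + 1))
--     curr = [0] * (len(t) + 1)
--     for i, sc in enumerate(s, 1):
--         curr[0] = i
--         for j, tc in enumerate(t, 1):
--             cost = 0 if sc == tc else 1
--             curr[j] = min(curr[j - 1] + 1, prev[j] + 1, prev[j - 1] + cost)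
--         prev, curr = curr, prev
--     return prev[len(t)]
--
-- def _is_likely_epa(domain):
--     """Check if domain is likely a garbled form of epa.gov."""
--     # Must end with .gov (or a suffix that's been fixed to .gov)
--     if not domain.endswith('.gov'):
--         return False
--     host = domain[:-4]  # strip .gov
--     if not host:
--         return False
--     # Exact 3-char host that's close to 'epa'
--     if len(host) == 3:
--         dist = levenshtein(host, 'epa')
--         return dist <= 1
--     # Hosts with extra chars from OCR (like 'efia', 'ejaa', 'eiaa', 'elaa')
--     if len(host) == 4:
--         # Check if removing one char gives 'epa' (edit distance 1 = insertion)
--         for i in range(len(host)):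
--             reduced = host[:i] + host[i+1:]
--             if levenshtein(reduced, 'epa') <= 1:
--                 return True
--     return False
-- ===== SOURCE B (Python) =====
-- def _dist(s, t):
--     """Plain recursive Levenshtein distance (strings here have length <= 4)."""
--     if not s:
--         return len(t)
--     if not t:
--         return len(s)
--     if s[0] == t[0]:
--         return _dist(s[1:], t[1:])
--     return 1 + min(_dist(s[1:], t), _dist(s, t[1:]), _dist(s[1:], t[1:]))
--
-- def _is_likely_epa(domain):
--     """Check if domain is likely a garbled form of epa.gov."""
--     if not domain.endswith('.gov'):
--         return False
--     host = domain[:-4]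
--     if len(host) == 3:
--         return _dist(host, 'epa') <= 1
--     if len(host) == 4:
--         # one deletion yielding a string within distance 1 of 'epa'
--         # is the same as being within distance 2 of 'epa' outright
--         return _dist(host, 'epa') <= 2
--     return False
-- ===== Notes on version B (the rewrite author's own statement) =====
-- stated objective: simpler
-- what changed: The two-row DP levenshtein is replaced by a plain recursive edit distance, and the length-4 branch's per-character deletion loop (4 nested distance calls on reduced strings) collapses to a single `_dist(host,'epa') <= 2` test.
import Mathlib
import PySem

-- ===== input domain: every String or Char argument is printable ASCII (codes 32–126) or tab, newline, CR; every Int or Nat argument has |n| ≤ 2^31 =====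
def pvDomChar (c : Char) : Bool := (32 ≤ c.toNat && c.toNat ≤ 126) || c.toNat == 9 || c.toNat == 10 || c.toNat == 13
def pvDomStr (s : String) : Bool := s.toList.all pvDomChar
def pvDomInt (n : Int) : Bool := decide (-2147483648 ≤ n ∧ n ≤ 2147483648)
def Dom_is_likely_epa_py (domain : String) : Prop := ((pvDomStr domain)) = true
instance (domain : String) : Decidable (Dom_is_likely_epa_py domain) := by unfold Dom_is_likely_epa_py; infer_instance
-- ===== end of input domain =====

-- B replaces the two-row DP levenshtein by a plain recursive edit distance and collapses the
-- length-4 per-character deletion loop into a single distance-≤-2 test (objective: simpler).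

-- ===== PORT A =====
-- two-row DP levenshtein, transliterated on List Char (the convention's string carrier);
-- list reads use getD 0: every index the Python code reads is in range, so the default is never hit.
def lev_py (s t : List Char) : Int :=
  if s = t then 0
  else if s = [] then (t.length : Int)
  else if t = [] then (s.length : Int)
  else
    let prev0 : List Int := (List.range (t.length + 1)).map (fun k => (k : Int))
    let curr0 : List Int := List.replicate (t.length + 1) 0
    let res := (PySem.List.enumerate s 1).foldl
      (fun (pc : List Int × List Int) isc =>
        let curr1 := pc.2.set 0 isc.1
        let curr2 := (PySem.List.enumerate t 1).foldl
          (fun (cur : List Int) jtc =>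
            let j := jtc.1.toNat
            let cost : Int := if isc.2 = jtc.2 then 0 else 1
            cur.set j (min (min (cur.getD (j-1) 0 + 1) (pc.1.getD j 0 + 1))
                           (pc.1.getD (j-1) 0 + cost)))
          curr1
        (curr2, pc.1))
      (prev0, curr0)
    res.1.getD t.length 0

-- body of _is_likely_epa after 'host = domain[:-4]' (the early-return deletion loop is List.any)
def epa_host_check (host : List Char) : Bool :=
  if host = [] then false
  else if host.length = 3 then decide (lev_py host ['e','p','a'] ≤ 1)
  else if host.length = 4 then
    (PySem.List.pyRange 0 (host.length : Int) 1).any (fun i =>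
      decide (lev_py (PySem.List.slice host none (some i) ++
                      PySem.List.slice host (some (i+1)) none) ['e','p','a'] ≤ 1))
  else false

def is_likely_epa_py (domain : String) : Bool :=
  if PySem.Str.endswith domain ".gov" then
    epa_host_check (PySem.List.slice domain.toList none (some (-4)))
  else false

-- ===== PORT B =====
-- Source B's _dist: plain recursive Levenshtein distance
def dist_rec (s t : List Char) : Int :=
  match s, t with
  | [], t => (t.length : Int)
  | s, [] => (s.length : Int)
  | a :: s', b :: t' =>
    if a = b then dist_rec s' t'
    else 1 + min (min (dist_rec s' (b :: t')) (dist_rec (a :: s') t')) (dist_rec s' t')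
termination_by (s.length + t.length)
decreasing_by all_goals first | (simp; omega) | simp

def alt_host_check (host : List Char) : Bool :=
  if host.length = 3 then decide (dist_rec host ['e','p','a'] ≤ 1)
  else if host.length = 4 then decide (dist_rec host ['e','p','a'] ≤ 2)
  else false

def is_likely_epa_py_alt (domain : String) : Bool :=
  if PySem.Str.endswith domain ".gov" then
    alt_host_check (PySem.List.slice domain.toList none (some (-4)))
  else false

-- ===== PRECONDITION & SPEC =====
def Spec_is_likely_epa_py (domain : String) (out : Bool) : Prop := out = is_likely_epa_py_alt domain
instance (domain : String) (out : Bool) : Decidable (Spec_is_likely_epa_py domain out) := by unfold Spec_is_likely_epa_py; infer_instance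

-- ===== CLAIM (what is proved, stated in full; the proofs are below) =====
def Claim_equal_is_likely_epa_py : Prop := ∀ (domain : String), Dom_is_likely_epa_py domain → Spec_is_likely_epa_py domain (is_likely_epa_py domain)

-- ===== LEMMAS AND PROOFS =====

-- Both distance computations compare host characters only with 'e','p','a', so the result
-- depends only on each character's class under this map; that reduces the host-level
-- equivalence to finitely many cases over the alphabet ['e','p','a','?'].
def phiEpa (c : Char) : Char :=
  if c = 'e' then 'e' else if c = 'p' then 'p' else if c = 'a' then 'a' else '?'

theorem phiEpa_mem (c : Char) : phiEpa c ∈ (['e','p','a','?'] : List Char) := by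
  unfold phiEpa; split_ifs <;> simp

theorem phiEpa_eq_iff (c d : Char) (hd : d = 'e' ∨ d = 'p' ∨ d = 'a') :
    (phiEpa c = d) ↔ (c = d) := by
  unfold phiEpa
  rcases hd with h | h | h <;> subst h <;> split_ifs with h1 h2 h3 <;> simp_all

theorem dist_rec_phi (s t : List Char) (ht : ∀ d ∈ t, d = 'e' ∨ d = 'p' ∨ d = 'a') :
    dist_rec (s.map phiEpa) t = dist_rec s t := by
  fun_induction dist_rec s t with
  | case1 t => simp [dist_rec]
  | case2 s h => cases s <;> simp [dist_rec]
  | case3 s' b t' ih =>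
    have hb := ht b (by simp)
    have hfix : phiEpa b = b := (phiEpa_eq_iff b b hb).mpr rfl
    simp only [List.map_cons, hfix, dist_rec]
    exact ih (fun d hd => ht d (List.mem_cons_of_mem _ hd))
  | case4 a s' b t' hab ih3 ih2 ih1 =>
    have hb := ht b (by simp)
    have ht' : ∀ d ∈ t', d = 'e' ∨ d = 'p' ∨ d = 'a' := fun d hd => ht d (List.mem_cons_of_mem _ hd)
    simp only [List.map_cons, dist_rec]
    rw [if_neg (by rw [phiEpa_eq_iff a b hb]; exact hab)]
    rw [show (phiEpa a :: List.map phiEpa s') = List.map phiEpa (a :: s') from rfl]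
    rw [ih1 ht', ih2 ht', ih3 ht]

theorem cost_phi (c d : Char) (hd : d = 'e' ∨ d = 'p' ∨ d = 'a') :
    (if phiEpa c = d then (0:Int) else 1) = if c = d then 0 else 1 :=
  if_congr (phiEpa_eq_iff c d hd) rfl rfl

theorem enumerate_map {α β : Type} (f : α → β) (l : List α) (n : Int) :
    PySem.List.enumerate (l.map f) n = (PySem.List.enumerate l n).map (fun p => (p.1, f p.2)) := by
  induction l generalizing n with
  | nil => simp [PySem.List.enumerate_nil]
  | cons a l ih => simp [PySem.List.enumerate_cons, ih]

theorem map_phi_eq_epa_iff (s : List Char) :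
    s.map phiEpa = ['e','p','a'] ↔ s = ['e','p','a'] := by
  constructor
  · intro h
    have hl : s.length = 3 := by simpa using congrArg List.length h
    match s, List.length_eq_three.mp hl with
    | _, ⟨a, b, c, rfl⟩ =>
      simp only [List.map_cons, List.map_nil, List.cons.injEq, and_true] at h ⊢
      exact ⟨(phiEpa_eq_iff a 'e' (by simp)).mp h.1,
             (phiEpa_eq_iff b 'p' (by simp)).mp h.2.1,
             (phiEpa_eq_iff c 'a' (by simp)).mp h.2.2⟩
  · intro h; subst h; decide

theorem lev_py_phi (s : List Char) :
    lev_py (s.map phiEpa) ['e','p','a'] = lev_py s ['e','p','a'] := by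
  by_cases hs : s = ['e','p','a']
  · subst hs; decide
  · by_cases h0 : s = []
    · subst h0; decide
    · have h1 : s.map phiEpa ≠ ['e','p','a'] := fun h => hs ((map_phi_eq_epa_iff s).mp h)
      have h2 : s.map phiEpa ≠ [] := by simpa using h0
      unfold lev_py
      rw [if_neg h1, if_neg h2, if_neg hs, if_neg h0]
      simp only [if_neg (by decide : ¬(['e','p','a'] : List Char) = [])]
      rw [enumerate_map, List.foldl_map]
      refine congrArg (fun r : List Int × List Int => r.1.getD (['e','p','a'] : List Char).length 0)
        (PySem.List.foldl_congr_mem _ _ _ _ ?_)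
      intro pc isc _
      simp only [show PySem.List.enumerate (['e','p','a'] : List Char) 1
          = [(1,'e'),(2,'p'),(3,'a')] from rfl, List.foldl_cons, List.foldl_nil]
      rw [cost_phi isc.2 'e' (by simp), cost_phi isc.2 'p' (by simp), cost_phi isc.2 'a' (by simp)]

theorem key3 : ∀ a ∈ (['e','p','a','?'] : List Char), ∀ b ∈ (['e','p','a','?'] : List Char),
    ∀ c ∈ (['e','p','a','?'] : List Char),
    decide (lev_py [a,b,c] ['e','p','a'] ≤ 1) = decide (dist_rec [a,b,c] ['e','p','a'] ≤ 1) := by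
  intro a ha b hb c hc
  fin_cases ha <;> fin_cases hb <;> fin_cases hc <;> simp [dist_rec] <;> decide

set_option maxHeartbeats 4000000 in
theorem key4 : ∀ a ∈ (['e','p','a','?'] : List Char), ∀ b ∈ (['e','p','a','?'] : List Char),
    ∀ c ∈ (['e','p','a','?'] : List Char), ∀ d ∈ (['e','p','a','?'] : List Char),
    (decide (lev_py [b,c,d] ['e','p','a'] ≤ 1) || (decide (lev_py [a,c,d] ['e','p','a'] ≤ 1) ||
     (decide (lev_py [a,b,d] ['e','p','a'] ≤ 1) || decide (lev_py [a,b,c] ['e','p','a'] ≤ 1))))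
      = decide (dist_rec [a,b,c,d] ['e','p','a'] ≤ 2) := by
  intro a ha b hb c hc d hd
  fin_cases ha <;> fin_cases hb <;> fin_cases hc <;> fin_cases hd <;> simp [dist_rec] <;> decide

theorem checkA_four (a b c d : Char) : epa_host_check [a,b,c,d] =
    (decide (lev_py [b,c,d] ['e','p','a'] ≤ 1) || (decide (lev_py [a,c,d] ['e','p','a'] ≤ 1) ||
     (decide (lev_py [a,b,d] ['e','p','a'] ≤ 1) || decide (lev_py [a,b,c] ['e','p','a'] ≤ 1)))) := by
  unfold epa_host_check
  rw [if_neg (by simp), if_neg (by simp), if_pos (by simp)]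
  rw [show ((([a,b,c,d] : List Char).length : Int)) = 4 by simp]
  rw [show PySem.List.pyRange 0 4 1 = [0,1,2,3] from by decide]
  simp only [List.any_cons, List.any_nil, Bool.or_false]
  rw [PySem.List.slice_to _ (by norm_num), PySem.List.slice_to _ (by norm_num),
      PySem.List.slice_to _ (by norm_num), PySem.List.slice_to _ (by norm_num),
      PySem.List.slice_from _ (by norm_num), PySem.List.slice_from _ (by norm_num),
      PySem.List.slice_from _ (by norm_num), PySem.List.slice_from _ (by norm_num)]
  rfl

theorem host_check_eq (host : List Char) : epa_host_check host = alt_host_check host := by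
  by_cases h0 : host = []
  · subst h0; decide
  · by_cases h3 : host.length = 3
    · obtain ⟨a, b, c, rfl⟩ := List.length_eq_three.mp h3
      have hA : epa_host_check [a,b,c] = decide (lev_py [a,b,c] ['e','p','a'] ≤ 1) := by
        unfold epa_host_check; rw [if_neg (by simp), if_pos (by simp)]
      have hB : alt_host_check [a,b,c] = decide (dist_rec [a,b,c] ['e','p','a'] ≤ 1) := by
        unfold alt_host_check; rw [if_pos (by simp)]
      rw [hA, hB, ← lev_py_phi [a,b,c], ← dist_rec_phi [a,b,c] _ (by intro x hx; fin_cases hx <;> simp)]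
      simp only [List.map_cons, List.map_nil]
      exact key3 _ (phiEpa_mem a) _ (phiEpa_mem b) _ (phiEpa_mem c)
    · by_cases h4 : host.length = 4
      · match host, h4 with
        | a :: host', h4 =>
        obtain ⟨b, c, d, rfl⟩ := List.length_eq_three.mp (by simpa using h4)
        have hB : alt_host_check [a,b,c,d] = decide (dist_rec [a,b,c,d] ['e','p','a'] ≤ 2) := by
          unfold alt_host_check; rw [if_neg (by simp), if_pos (by simp)]
        rw [checkA_four, hB, ← lev_py_phi [b,c,d], ← lev_py_phi [a,c,d], ← lev_py_phi [a,b,d],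
            ← lev_py_phi [a,b,c], ← dist_rec_phi [a,b,c,d] _ (by intro x hx; fin_cases hx <;> simp)]
        simp only [List.map_cons, List.map_nil]
        exact key4 _ (phiEpa_mem a) _ (phiEpa_mem b) _ (phiEpa_mem c) _ (phiEpa_mem d)
      · have hA : epa_host_check host = false := by
          unfold epa_host_check; rw [if_neg h0, if_neg h3, if_neg h4]
        have hB : alt_host_check host = false := by
          unfold alt_host_check; rw [if_neg h3, if_neg h4]
        rw [hA, hB]

-- ===== VERDICT (by name: the statement is the Claim_ definition above) =====
theorem is_likely_epa_py_spec : Claim_equal_is_likely_epa_py := by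
  intro domain _
  unfold Spec_is_likely_epa_py is_likely_epa_py is_likely_epa_py_alt
  rw [host_check_eq]
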